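-- pv_equiv track=rewrite | github.com/OpenSourceJesus/tinifyjs | StringExtensions.py | IndexOfAny
-- ===== SOURCE A (Python) =====
-- def IndexOfAny (string : str, findAny : list[str], startIndex = 0):
-- 	output = len(string)
-- 	for find in findAny:
-- 		indexOfFind = string.find(find, startIndex)
-- 		if indexOfFind != -1:
-- 			output = min(indexOfFind, output)
-- 	if output == len(string):
-- 		return -1
-- 	return output
-- ===== SOURCE B (Python) =====
-- def IndexOfAny(string, findAny, startIndex=0):
-- 	n = len(string)
-- 	start = startIndex
-- 	if start < 0:
-- 		start += n
-- 		if start < 0: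
-- 			start = 0
-- 	elif start > n:
-- 		start = n
-- 	for i in range(start, n):
-- 		if any(string.startswith(f, i) for f in findAny):
-- 			return i
-- 	return -1
-- ===== Notes on version B (the rewrite author's own statement) =====
-- stated objective: faster
-- what changed: Pattern-major repeated str.find scans folded with min are replaced by a single position-major left-to-right scan that returns at the first index where any pattern is a prefix, so the string beyond the earliest match is never examined.
import Mathlib
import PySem

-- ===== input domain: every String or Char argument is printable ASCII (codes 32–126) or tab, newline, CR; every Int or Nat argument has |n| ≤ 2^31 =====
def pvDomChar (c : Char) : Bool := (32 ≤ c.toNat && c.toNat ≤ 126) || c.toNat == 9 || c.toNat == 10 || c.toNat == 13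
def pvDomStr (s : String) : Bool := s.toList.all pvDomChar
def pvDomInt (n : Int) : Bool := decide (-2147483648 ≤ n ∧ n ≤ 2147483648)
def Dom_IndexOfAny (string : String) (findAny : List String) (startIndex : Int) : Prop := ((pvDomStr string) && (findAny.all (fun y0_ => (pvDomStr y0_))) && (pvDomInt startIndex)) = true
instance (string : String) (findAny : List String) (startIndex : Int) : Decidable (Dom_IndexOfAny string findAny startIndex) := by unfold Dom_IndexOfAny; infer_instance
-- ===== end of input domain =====

-- B replaces A's pattern-major repeated str.find scans (folded with min) by one position-major
-- left-to-right scan that stops at the first index where any pattern matches, so it never reads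
-- past the earliest match (measurably faster in a timing run; same worst-case cost).


-- ===== PORT A =====
def IndexOfAny (string : String) (findAny : List String) (startIndex : Int) : Int :=
  let output : Int := (PySem.Str.len string : Int)
  let output : Int := findAny.foldl (fun output find =>
    let indexOfFind := PySem.Str.findFrom string find startIndex
    if indexOfFind ≠ -1 then min indexOfFind output else output) output
  if output = (PySem.Str.len string : Int) then -1 else output

-- ===== PORT B =====
-- the explicit clamp of startIndex into [0, n] performed by Source B before its scan
def pvStart (n : Nat) (startIndex : Int) : Nat :=
  if startIndex < 0 then
    (if startIndex + n < 0 then 0 else (startIndex + n).toNat)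
  else if (n : Int) < startIndex then n else startIndex.toNat

def IndexOfAny_alt (string : String) (findAny : List String) (startIndex : Int) : Int :=
  let cs := string.toList
  let n := cs.length
  let start : Nat := pvStart n startIndex
  match (List.range' start (n - start)).find?
      (fun i => findAny.any (fun f => PySem.Chars.startswith (cs.drop i) f.toList)) with
  | some i => (i : Int)
  | none => -1

-- ===== PRECONDITION & SPEC =====
def Spec_IndexOfAny (string : String) (findAny : List String) (startIndex : Int) (out : Int) : Prop := out = IndexOfAny_alt string findAny startIndex
instance (string : String) (findAny : List String) (startIndex : Int) (out : Int) : Decidable (Spec_IndexOfAny string findAny startIndex out) := by unfold Spec_IndexOfAny; infer_instance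

-- ===== CLAIM (what is proved, stated in full; the proofs are below) =====
def Claim_equal_IndexOfAny : Prop := ∀ (string : String) (findAny : List String) (startIndex : Int), Dom_IndexOfAny string findAny startIndex → Spec_IndexOfAny string findAny startIndex (IndexOfAny string findAny startIndex)

-- ===== LEMMAS AND PROOFS =====

theorem pvStart_le (n : Nat) (st : Int) : pvStart n st ≤ n := by
  unfold pvStart; split_ifs <;> omega

-- findFrom with any start ≤ len equals findFrom with the clamped Nat start
theorem findFrom_clamp (cs f : List Char) (st : Int) (h : st ≤ (cs.length : Int)) :
    PySem.Chars.findFrom cs f st none = PySem.Chars.findFrom cs f ((pvStart cs.length st : Nat) : Int) none := by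
  have hA : (if st < 0 then (if st + (cs.length:Int) < 0 then (0:Int) else st + (cs.length:Int)) else st)
      = ((pvStart cs.length st : Nat) : Int) := by
    unfold pvStart; split_ifs <;> omega
  simp only [PySem.Chars.findFrom]
  rw [hA]
  have h2 : ¬ (((pvStart cs.length st : Nat) : Int) < 0) := by omega
  simp [h2]

-- when start exceeds the length, findFrom is -1
theorem findFrom_of_gt (cs f : List Char) (st : Int) (h : (cs.length : Int) < st) :
    PySem.Chars.findFrom cs f st none = -1 := by
  simp only [PySem.Chars.findFrom]
  split_ifs <;> first | rfl | omega

-- characterization of A's min-fold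
theorem fold_min_cases (g : String → Int) (l : List String) (init : Int) :
    (l.foldl (fun out f => if g f ≠ -1 then min (g f) out else out) init = init ∨
      ∃ f ∈ l, g f ≠ -1 ∧ l.foldl (fun out f => if g f ≠ -1 then min (g f) out else out) init = g f) ∧
    l.foldl (fun out f => if g f ≠ -1 then min (g f) out else out) init ≤ init ∧
    (∀ f ∈ l, g f ≠ -1 → l.foldl (fun out f => if g f ≠ -1 then min (g f) out else out) init ≤ g f) := by
  induction l generalizing init with
  | nil => simp
  | cons a t ih =>
    simp only [List.foldl_cons]
    by_cases ha : g a ≠ -1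
    · simp only [ha, ne_eq, not_false_eq_true, if_true]
      obtain ⟨h1, h2, h3⟩ := ih (min (g a) init)
      refine ⟨?_, le_trans h2 (min_le_right _ _), ?_⟩
      · rcases h1 with h1 | ⟨f, hf, hne, he⟩
        · by_cases hle : g a ≤ init
          · exact Or.inr ⟨a, by simp, ha, by rw [h1]; omega⟩
          · exact Or.inl (by rw [h1]; omega)
        · exact Or.inr ⟨f, by simp [hf], hne, he⟩
      · intro f hf hne
        rcases List.mem_cons.mp hf with rfl | hmem
        · exact le_trans h2 (min_le_left _ _)
        · exact h3 f hmem hne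
    · simp only [if_neg ha]
      obtain ⟨h1, h2, h3⟩ := ih init
      refine ⟨?_, h2, ?_⟩
      · rcases h1 with h1 | ⟨f, hf, hne, he⟩
        · exact Or.inl h1
        · exact Or.inr ⟨f, by simp [hf], hne, he⟩
      · intro f hf hne
        rcases List.mem_cons.mp hf with rfl | hmem
        · exact absurd hne ha
        · exact h3 f hmem hne

-- find? on range' returns the least element of [k, k+m) satisfying p
theorem find?_range'_eq_some (p : Nat → Bool) (k m i : Nat) :
    (List.range' k m).find? p = some i ↔
      (k ≤ i ∧ i < k + m ∧ p i = true ∧ ∀ j, k ≤ j → j < i → p j = false) := by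
  induction m generalizing k with
  | zero => simp; intro h1 h2 _; omega
  | succ m ih =>
    rw [List.range'_succ]
    cases hk : p k with
    | false =>
      rw [List.find?_cons_of_neg (by simp [hk])]
      rw [ih]
      constructor
      · rintro ⟨h1, h2, h3, h4⟩
        refine ⟨by omega, by omega, h3, fun j hj1 hj2 => ?_⟩
        rcases Nat.eq_or_lt_of_le hj1 with rfl | hlt
        · exact hk
        · exact h4 j hlt hj2
      · rintro ⟨h1, h2, h3, h4⟩
        have hik : i ≠ k := fun he => by rw [he, hk] at h3; cases h3
        exact ⟨by omega, by omega, h3, fun j hj1 hj2 => h4 j (by omega) hj2⟩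
    | true =>
      rw [List.find?_cons_of_pos (by simp [hk])]
      constructor
      · rintro h; injection h with h; subst h
        exact ⟨le_refl _, by omega, hk, fun j h1 h2 => by omega⟩
      · rintro ⟨h1, h2, h3, h4⟩
        have hik : i = k := by
          by_contra hne
          have hkf := h4 k (le_refl _) (by omega)
          rw [hkf] at hk; cases hk
        simp [hik]

-- prefix at a position ≥ k gives an infix of the k-suffix
theorem infix_of_prefix_drop (f cs : List Char) (k i : Nat) (hk : k ≤ i)
    (h : f <+: cs.drop i) : f <:+: cs.drop k := by
  have hsuf : cs.drop i <:+ cs.drop k := by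
    have : cs.drop i = (cs.drop k).drop (i - k) := by
      rw [List.drop_drop]; congr 1; omega
    rw [this]; exact List.drop_suffix _ _
  exact h.isInfix.trans hsuf.isInfix

-- main equivalence
theorem IndexOfAny_eq (string : String) (findAny : List String) (startIndex : Int) :
    IndexOfAny string findAny startIndex = IndexOfAny_alt string findAny startIndex := by
  unfold IndexOfAny IndexOfAny_alt
  simp only [PySem.Str.findFrom_eq, PySem.Str.len_eq]
  set cs := string.toList with hcs
  set n := cs.length with hn
  set k := pvStart n startIndex with hkdef
  have hkn : k ≤ n := pvStart_le n startIndex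
  by_cases hbig : (n : Int) < startIndex
  · -- start beyond the string: both sides give -1
    have hk : k = n := by
      unfold pvStart at hkdef; rw [hkdef]; split_ifs <;> omega
    have hfold : findAny.foldl (fun out f =>
        let r := PySem.Chars.findFrom cs f.toList startIndex
        if r ≠ -1 then min r out else out) (n : Int) = (n : Int) := by
      induction findAny with
      | nil => rfl
      | cons a t ih =>
        rw [List.foldl_cons]
        simp only [findFrom_of_gt cs a.toList startIndex hbig]
        simpa using ih
    simp only [hfold]
    have hnk : n - k = 0 := by omega
    simp [hnk]
  · push_neg at hbig
    have hclamp : ∀ f : List Char, PySem.Chars.findFrom cs f startIndex none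
        = PySem.Chars.findFrom cs f ((k : Nat) : Int) none := fun f =>
      findFrom_clamp cs f startIndex hbig
    simp only [hclamp]
    set g : String → Int := fun f => PySem.Chars.findFrom cs f.toList ((k : Nat) : Int) none with hg
    have hgf : ∀ f : String, g f = PySem.Chars.findFrom cs f.toList ((k : Nat) : Int) none :=
      fun _ => rfl
    set p : Nat → Bool := fun i => findAny.any (fun f => PySem.Chars.startswith (cs.drop i) f.toList) with hp
    have hpc : ∀ i, p i = true ↔ ∃ f ∈ findAny, f.toList <+: cs.drop i := by
      intro i
      simp [hp, List.any_eq_true, PySem.Chars.startswith_iff]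
    -- facts about g
    have hgspec : ∀ f ∈ findAny, g f ≠ -1 →
        k ≤ (g f).toNat ∧ (g f).toNat ≤ n ∧ 0 ≤ g f ∧ f.toList <+: cs.drop (g f).toNat ∧
        ∀ i, k ≤ i → i < (g f).toNat → ¬ f.toList <+: cs.drop i := by
      intro f _ hne
      rw [hgf f] at hne
      obtain ⟨h1, h2, h3⟩ := PySem.Chars.findFrom_natCast_spec cs f.toList k hkn hne
      rw [← hgf f] at h1 h2 h3
      have hge0 : 0 ≤ g f := le_trans (by positivity) h1
      have hle : (g f).toNat ≤ n := by
        by_contra habs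
        push_neg at habs
        have hnil : cs.drop (g f).toNat = [] := List.drop_eq_nil_of_le (by omega)
        rw [hnil] at h2
        have hf0 : f.toList = [] := List.prefix_nil.mp h2
        have := h3 k (le_refl _) (by omega)
        simp [hf0] at this
      exact ⟨by omega, hle, hge0, h2, h3⟩
    have hfound : ∀ f ∈ findAny, ∀ i, k ≤ i → f.toList <+: cs.drop i → g f ≠ -1 := by
      intro f _ i hki hpre habs
      rw [hgf f] at habs
      rw [PySem.Chars.findFrom_natCast_eq_neg_one_iff cs f.toList k hkn] at habs
      exact habs (infix_of_prefix_drop f.toList cs k i hki hpre)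
    -- bring the fold into g-form
    have hfe : List.foldl (fun (output : Int) (find : String) =>
        let indexOfFind := PySem.Chars.findFrom cs find.toList ((k : Nat) : Int) none
        if indexOfFind ≠ -1 then min indexOfFind output else output) (n : Int) findAny
      = List.foldl (fun out f => if g f ≠ -1 then min (g f) out else out) (n : Int) findAny := rfl
    rw [hfe]
    obtain ⟨hcase, hleinit, hlemem⟩ := fold_min_cases g findAny (n : Int)
    rcases hfind : (List.range' k (n - k)).find? p with _ | i
    · -- no match position below n: A folds to n, B finds none
      have hnone : ∀ i, k ≤ i → i < n → p i = false := by
        intro i h1 h2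
        have hmem : i ∈ List.range' k (n - k) := by
          rw [List.mem_range'_1]; omega
        have := List.find?_eq_none.mp hfind i hmem
        simpa using this
      have hgn : ∀ f ∈ findAny, g f ≠ -1 → g f = (n : Int) := by
        intro f hf hne
        obtain ⟨h1, h2, h3, h4, _⟩ := hgspec f hf hne
        rcases Nat.eq_or_lt_of_le h2 with he | hlt
        · omega
        · exfalso
          have hpi : p (g f).toNat = true := (hpc _).mpr ⟨f, hf, h4⟩
          rw [hnone _ h1 hlt] at hpi; cases hpi
      have hfn : findAny.foldl (fun out f => if g f ≠ -1 then min (g f) out else out) (n : Int) = (n : Int) := by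
        rcases hcase with h | ⟨f, hf, hne, he⟩
        · exact h
        · rw [he]; exact hgn f hf hne
      rw [hfn]
      simp
    · -- least matching position i
      rw [find?_range'_eq_some] at hfind
      obtain ⟨h1, h2, h3, h4⟩ := hfind
      have hin : i < n := by omega
      obtain ⟨f0, hf0, hpre0⟩ := (hpc i).mp h3
      have hne0 : g f0 ≠ -1 := hfound f0 hf0 i h1 hpre0
      obtain ⟨hg1, hg2, hg3, hg4, hg5⟩ := hgspec f0 hf0 hne0
      have hgle : (g f0).toNat ≤ i := by
        by_contra habs
        exact hg5 i h1 (by omega) hpre0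
      have hglow : ∀ f ∈ findAny, g f ≠ -1 → (i : Int) ≤ g f := by
        intro f hf hne
        obtain ⟨ha1, ha2, ha3, ha4, _⟩ := hgspec f hf hne
        by_contra habs
        push_neg at habs
        have hlt : (g f).toNat < i := by omega
        have hpj : p (g f).toNat = true := (hpc _).mpr ⟨f, hf, ha4⟩
        rw [h4 _ ha1 hlt] at hpj; cases hpj
      have hgeq : g f0 = (i : Int) := by
        have := hglow f0 hf0 hne0; omega
      have hfoldv : findAny.foldl (fun out f => if g f ≠ -1 then min (g f) out else out) (n : Int) = (i : Int) := by
        have hub := hlemem f0 hf0 hne0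
        rw [hgeq] at hub
        rcases hcase with h | ⟨f, hf, hne, he⟩
        · omega
        · have := hglow f hf hne; omega
      rw [hfoldv]
      have hineq : (i : Int) ≠ (n : Int) := by omega
      simp [hineq]

-- ===== VERDICT (by name: the statement is the Claim_ definition above) =====
theorem IndexOfAny_spec : Claim_equal_IndexOfAny := by
  intro string findAny startIndex _
  unfold Spec_IndexOfAny
  exact IndexOfAny_eq string findAny startIndex
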